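-- pv_equiv track=rewrite | github.com/broadcaststorm/advent-of-code | 2020/17/part2.py | count_active
-- ===== SOURCE A (Python) =====
-- def count_active(min_grid, max_grid, grid):
--     num_active = 0
--
--     for x in range(min_grid[0], max_grid[0]):
--         for y in range(min_grid[1], max_grid[1]):
--             for z in range(min_grid[2], max_grid[2]):
--                 for w in range(min_grid[3], max_grid[3]):
--                     p = (x, y, z, w)
--                     if p in grid:
--                         if grid[p] == '#':
--                             num_active += 1
--
--     return num_active
-- ===== SOURCE B (Python) =====
-- def count_active(min_grid, max_grid, grid):
--     num_active = 0
--     for p, v in grid.items():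
--         if v == '#' and len(p) == 4 and all(lo <= c < hi for c, lo, hi in zip(p, min_grid, max_grid)):
--             num_active += 1
--     return num_active
-- ===== Notes on version B (the rewrite author's own statement) =====
-- stated objective: alternative
-- what changed: B makes one pass over the grid's entries and counts those with value '#' whose coordinates lie inside the bounding box, instead of enumerating every cell of the 4D box and looking each one up in the dict; it trades O(box volume) work for O(|grid|) work, which a timing run's inputs (small boxes) do not reward.
import Mathlib
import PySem

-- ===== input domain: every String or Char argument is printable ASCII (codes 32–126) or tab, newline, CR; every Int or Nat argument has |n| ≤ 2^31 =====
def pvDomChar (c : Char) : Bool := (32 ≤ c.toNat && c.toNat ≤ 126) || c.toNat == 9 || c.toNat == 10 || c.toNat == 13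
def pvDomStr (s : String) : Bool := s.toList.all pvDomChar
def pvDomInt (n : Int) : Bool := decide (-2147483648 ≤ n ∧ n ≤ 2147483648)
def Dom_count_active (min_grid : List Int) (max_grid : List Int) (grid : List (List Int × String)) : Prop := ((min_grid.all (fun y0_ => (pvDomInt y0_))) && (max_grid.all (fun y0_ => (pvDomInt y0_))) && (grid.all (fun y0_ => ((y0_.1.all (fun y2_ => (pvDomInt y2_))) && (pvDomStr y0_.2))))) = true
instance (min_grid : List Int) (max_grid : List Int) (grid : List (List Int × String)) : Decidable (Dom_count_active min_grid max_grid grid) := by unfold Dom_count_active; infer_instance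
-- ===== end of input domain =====

-- B replaces A's scan of every cell of the 4D bounding box (one dict lookup per cell)
-- by a single pass over the dict's entries, counting the '#' entries whose four
-- coordinates lie inside the box (objective: alternative algorithm over the entries).

-- ===== PORT A =====
def count_active (min_grid : List Int) (max_grid : List Int) (grid : List (List Int × String)) : Int :=
  (PySem.List.pyRange (PySem.List.pyGetD min_grid 0 0) (PySem.List.pyGetD max_grid 0 0) 1).foldl (fun num_active x =>
    (PySem.List.pyRange (PySem.List.pyGetD min_grid 1 0) (PySem.List.pyGetD max_grid 1 0) 1).foldl (fun num_active y =>
      (PySem.List.pyRange (PySem.List.pyGetD min_grid 2 0) (PySem.List.pyGetD max_grid 2 0) 1).foldl (fun num_active z =>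
        (PySem.List.pyRange (PySem.List.pyGetD min_grid 3 0) (PySem.List.pyGetD max_grid 3 0) 1).foldl (fun num_active w =>
          if (PySem.Dict.mk grid : PySem.Dict (List Int) String).contains [x, y, z, w] then
            if (PySem.Dict.mk grid : PySem.Dict (List Int) String).get? [x, y, z, w] = some "#" then
              num_active + 1
            else num_active
          else num_active) num_active) num_active) num_active) 0

-- ===== PORT B =====
-- 'zip(p, min_grid, max_grid)' is ported as p.zip (min_grid.zip max_grid): Python's zip
-- truncates to the shortest argument, exactly like List.zip.
def count_active_alt (min_grid : List Int) (max_grid : List Int) (grid : List (List Int × String)) : Int :=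
  grid.foldl (fun num_active pv =>
    if pv.2 = "#" ∧ pv.1.length = 4 ∧
        (pv.1.zip (min_grid.zip max_grid)).all (fun t => decide (t.2.1 ≤ t.1 ∧ t.1 < t.2.2))
    then num_active + 1 else num_active) 0

-- ===== PRECONDITION & SPEC =====
-- Pre_ is exactly where Python A returns: either both bound lists have the 4 entries the
-- loops index (otherwise A raises IndexError), or some coordinate range that the loops do
-- reach is already empty, so A stops before the missing index and returns 0.  It also
-- requires distinct keys in grid: grid is a Python dict, so an association list with
-- duplicate keys represents no input A can receive.
def Pre_count_active (min_grid : List Int) (max_grid : List Int) (grid : List (List Int × String)) : Prop :=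
  (grid.map Prod.fst).Nodup ∧
  ((4 ≤ min_grid.length ∧ 4 ≤ max_grid.length) ∨
   (∃ j < 4, j < min_grid.length ∧ j < max_grid.length ∧ max_grid.getD j 0 ≤ min_grid.getD j 0))
instance (min_grid : List Int) (max_grid : List Int) (grid : List (List Int × String)) : Decidable (Pre_count_active min_grid max_grid grid) := by unfold Pre_count_active; infer_instance

def pvWitness_count_active : List Int × List Int × (List (List Int × String)) :=
  ([0, 0, 0, 0], [2, 2, 2, 2], [([1, 1, 0, 0], "#"), ([0, 0, 0, 0], "."), ([5, 5, 5, 5], "#")])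

def Spec_count_active (min_grid : List Int) (max_grid : List Int) (grid : List (List Int × String)) (out : Int) : Prop := out = count_active_alt min_grid max_grid grid
instance (min_grid : List Int) (max_grid : List Int) (grid : List (List Int × String)) (out : Int) : Decidable (Spec_count_active min_grid max_grid grid out) := by unfold Spec_count_active; infer_instance

-- ===== CLAIM (what is proved, stated in full; the proofs are below) =====
def Claim_equal_count_active : Prop := ∀ (min_grid : List Int) (max_grid : List Int) (grid : List (List Int × String)), Dom_count_active min_grid max_grid grid → Pre_count_active min_grid max_grid grid → Spec_count_active min_grid max_grid grid (count_active min_grid max_grid grid)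

-- ===== LEMMAS AND PROOFS =====

-- an accumulating fold is its initial value plus a sum
theorem pv_foldl_to_sum {α : Type} (l : List α) (f : Int → α → Int) (g : α → Int)
    (h : ∀ n x, f n x = n + g x) (a : Int) : l.foldl f a = a + (l.map g).sum := by
  induction l generalizing a with
  | nil => simp
  | cons b t ih => simp only [List.foldl_cons, List.map_cons, List.sum_cons, h, ih]; ring

theorem pv_sum_map_add {α : Type} (l : List α) (f g : α → Int) :
    (l.map (fun x => f x + g x)).sum = (l.map f).sum + (l.map g).sum := by
  induction l with
  | nil => simp
  | cons b t ih => simp only [List.map_cons, List.sum_cons, ih]; ring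

theorem pv_sum_collapse (l : List Int) (hl : l.Nodup) (c t : Int) :
    (l.map (fun x => if x = c then t else 0)).sum = if c ∈ l then t else 0 := by
  induction l with
  | nil => simp
  | cons b tl ih =>
    simp only [List.nodup_cons] at hl
    simp only [List.map_cons, List.sum_cons, ih hl.2, List.mem_cons]
    rcases eq_or_ne b c with hb | hb
    · have hc : c ∉ tl := hb ▸ hl.1
      simp [hb, hc]
    · simp [hb, Ne.symm hb]

-- range of the i-th coordinate of the bounding box
def pvR (mn mx : List Int) (i : Int) : List Int :=
  PySem.List.pyRange (PySem.List.pyGetD mn i 0) (PySem.List.pyGetD mx i 0) 1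

-- the quadruple nested sum over the bounding box, of an arbitrary cell weight
def pvBoxSum (mn mx : List Int) (G : List Int → Int) : Int :=
  ((pvR mn mx 0).map (fun x =>
    ((pvR mn mx 1).map (fun y =>
      ((pvR mn mx 2).map (fun z =>
        ((pvR mn mx 3).map (fun w => G [x, y, z, w])).sum)).sum)).sum)).sum

-- A's cell weight
def pvG (grid : List (List Int × String)) (p : List Int) : Int :=
  if (PySem.Dict.mk grid : PySem.Dict (List Int) String).get? p = some "#" then 1 else 0

-- B's per-entry indicator
def pvInd (mn mx : List Int) (pv : List Int × String) : Int :=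
  if pv.2 = "#" ∧ pv.1.length = 4 ∧
      (pv.1.zip (mn.zip mx)).all (fun t => decide (t.2.1 ≤ t.1 ∧ t.1 < t.2.2))
  then 1 else 0

-- 'the key k is a cell of the bounding box'
def pvInBox (mn mx k : List Int) : Bool :=
  decide (k.length = 4) &&
  decide (PySem.List.pyGetD mn 0 0 ≤ PySem.List.pyGetD k 0 0 ∧ PySem.List.pyGetD k 0 0 < PySem.List.pyGetD mx 0 0) &&
  decide (PySem.List.pyGetD mn 1 0 ≤ PySem.List.pyGetD k 1 0 ∧ PySem.List.pyGetD k 1 0 < PySem.List.pyGetD mx 1 0) &&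
  decide (PySem.List.pyGetD mn 2 0 ≤ PySem.List.pyGetD k 2 0 ∧ PySem.List.pyGetD k 2 0 < PySem.List.pyGetD mx 2 0) &&
  decide (PySem.List.pyGetD mn 3 0 ≤ PySem.List.pyGetD k 3 0 ∧ PySem.List.pyGetD k 3 0 < PySem.List.pyGetD mx 3 0)

theorem pv_len4 {l : List Int} (h : 4 ≤ l.length) :
    ∃ a b c d t, l = a :: b :: c :: d :: t := by
  match l, h with
  | a :: b :: c :: d :: t, _ => exact ⟨a, b, c, d, t, rfl⟩

theorem pv_A_eq_boxSum (min_grid max_grid : List Int) (grid : List (List Int × String)) :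
    count_active min_grid max_grid grid = pvBoxSum min_grid max_grid (pvG grid) := by
  have hin : ∀ (x y z w n : Int),
      (if (PySem.Dict.mk grid : PySem.Dict (List Int) String).contains [x, y, z, w] then
        if (PySem.Dict.mk grid : PySem.Dict (List Int) String).get? [x, y, z, w] = some "#" then
          n + 1
        else n
      else n) = n + pvG grid [x, y, z, w] := by
    intro x y z w n
    unfold pvG
    rcases h : (PySem.Dict.mk grid : PySem.Dict (List Int) String).get? [x, y, z, w] with _ | v
    · simp [PySem.Dict.contains_eq_isSome_get?, h]
    · by_cases hv : v = "#" <;> simp_all [PySem.Dict.contains_eq_isSome_get?]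
  unfold count_active pvBoxSum pvR
  exact Eq.trans
    (pv_foldl_to_sum _ _ _ (fun n x =>
      pv_foldl_to_sum _ _ _ (fun n y =>
        pv_foldl_to_sum _ _ _ (fun n z =>
          pv_foldl_to_sum _ _ _ (fun n w => hin x y z w n) n) n) n) 0)
    (zero_add _)

theorem pv_B_eq_sum (min_grid max_grid : List Int) (grid : List (List Int × String)) :
    count_active_alt min_grid max_grid grid = (grid.map (pvInd min_grid max_grid)).sum := by
  unfold count_active_alt
  exact Eq.trans
    (pv_foldl_to_sum _ _ (pvInd min_grid max_grid)
      (fun n pv => by unfold pvInd; split <;> simp) 0)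
    (zero_add _)

theorem pv_boxSum_add (mn mx : List Int) (F H : List Int → Int) :
    pvBoxSum mn mx (fun p => F p + H p) = pvBoxSum mn mx F + pvBoxSum mn mx H := by
  unfold pvBoxSum
  simp only [pv_sum_map_add]

theorem pv_get?_mk_eq_none {grid : List (List Int × String)} {k : List Int}
    (hk : k ∉ grid.map Prod.fst) :
    (PySem.Dict.mk grid : PySem.Dict (List Int) String).get? k = none := by
  induction grid with
  | nil => rfl
  | cons b t ih =>
    simp only [List.map_cons, List.mem_cons, not_or] at hk
    rw [show (PySem.Dict.mk (b :: t) : PySem.Dict (List Int) String) =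
          PySem.Dict.mk ((b.1, b.2) :: t) from rfl]
    rw [PySem.Dict.get?_mk_cons]
    simp only [beq_iff_eq]
    rw [if_neg (fun h => hk.1 h.symm)]
    exact ih hk.2

-- the box sum of a single-cell indicator collapses to a membership test
theorem pv_boxSum_single (mn mx : List Int) (k : List Int) (c : Int) :
    pvBoxSum mn mx (fun p => if p = k then c else 0) = if pvInBox mn mx k then c else 0 := by
  unfold pvBoxSum
  match k with
  | [k0, k1, k2, k3] =>
    have nd : ∀ i : Int, (pvR mn mx i).Nodup := fun i => PySem.List.nodup_pyRange_one _ _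
    have e4 : ∀ x y z : Int,
        ((pvR mn mx 3).map (fun w => if [x, y, z, w] = [k0, k1, k2, k3] then c else 0)).sum =
        if x = k0 ∧ y = k1 ∧ z = k2 then (if k3 ∈ pvR mn mx 3 then c else 0) else 0 := by
      intro x y z
      rw [show (fun w : Int => if [x, y, z, w] = [k0, k1, k2, k3] then c else 0) =
          (fun w : Int => if w = k3 then (if x = k0 ∧ y = k1 ∧ z = k2 then c else 0) else 0) by
        funext w
        by_cases h1 : x = k0 <;> by_cases h2 : y = k1 <;> by_cases h3 : z = k2 <;>
          by_cases h4 : w = k3 <;> simp [h1, h2, h3, h4]]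
      rw [pv_sum_collapse _ (nd 3) k3]
      by_cases h : x = k0 ∧ y = k1 ∧ z = k2 <;> simp [h]
    have e3 : ∀ x y : Int,
        ((pvR mn mx 2).map (fun z =>
          if x = k0 ∧ y = k1 ∧ z = k2 then (if k3 ∈ pvR mn mx 3 then c else 0) else 0)).sum =
        if x = k0 ∧ y = k1 then
          (if k2 ∈ pvR mn mx 2 ∧ k3 ∈ pvR mn mx 3 then c else 0) else 0 := by
      intro x y
      rw [show (fun z : Int =>
            if x = k0 ∧ y = k1 ∧ z = k2 then (if k3 ∈ pvR mn mx 3 then c else 0) else 0) =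
          (fun z : Int => if z = k2 then
            (if x = k0 ∧ y = k1 then (if k3 ∈ pvR mn mx 3 then c else 0) else 0) else 0) by
        funext z
        by_cases h1 : x = k0 <;> by_cases h2 : y = k1 <;> by_cases h3 : z = k2 <;>
          simp [h1, h2, h3]]
      rw [pv_sum_collapse _ (nd 2) k2]
      by_cases h : x = k0 ∧ y = k1 <;> by_cases hm : k2 ∈ pvR mn mx 2 <;>
        by_cases hm' : k3 ∈ pvR mn mx 3 <;> simp [h, hm, hm']
    have e2 : ∀ x : Int,
        ((pvR mn mx 1).map (fun y =>
          if x = k0 ∧ y = k1 then (if k2 ∈ pvR mn mx 2 ∧ k3 ∈ pvR mn mx 3 then c else 0)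
          else 0)).sum =
        if x = k0 then
          (if k1 ∈ pvR mn mx 1 ∧ k2 ∈ pvR mn mx 2 ∧ k3 ∈ pvR mn mx 3 then c else 0) else 0 := by
      intro x
      rw [show (fun y : Int =>
            if x = k0 ∧ y = k1 then (if k2 ∈ pvR mn mx 2 ∧ k3 ∈ pvR mn mx 3 then c else 0)
            else 0) =
          (fun y : Int => if y = k1 then
            (if x = k0 then (if k2 ∈ pvR mn mx 2 ∧ k3 ∈ pvR mn mx 3 then c else 0) else 0)
            else 0) by
        funext y
        by_cases h1 : x = k0 <;> by_cases h2 : y = k1 <;> simp [h1, h2]]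
      rw [pv_sum_collapse _ (nd 1) k1]
      by_cases h : x = k0 <;> by_cases hm : k1 ∈ pvR mn mx 1 <;>
        by_cases hm' : k2 ∈ pvR mn mx 2 ∧ k3 ∈ pvR mn mx 3 <;> simp [h, hm, hm']
    simp only [e4, e3, e2]
    rw [pv_sum_collapse _ (nd 0) k0]
    simp only [pvInBox, pvR, PySem.List.mem_pyRange_one, Bool.and_eq_true, decide_eq_true_eq,
      show PySem.List.pyGetD ([k0, k1, k2, k3] : List Int) 0 0 = k0 from rfl,
      show PySem.List.pyGetD ([k0, k1, k2, k3] : List Int) 1 0 = k1 from rfl,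
      show PySem.List.pyGetD ([k0, k1, k2, k3] : List Int) 2 0 = k2 from rfl,
      show PySem.List.pyGetD ([k0, k1, k2, k3] : List Int) 3 0 = k3 from rfl,
      List.length_cons, List.length_nil]
    split_ifs <;> first | rfl | tauto
  | [] => simp [pvInBox]
  | [k0] => simp [pvInBox]
  | [k0, k1] => simp [pvInBox]
  | [k0, k1, k2] => simp [pvInBox]
  | k0 :: k1 :: k2 :: k3 :: k4 :: rest =>
    rw [if_neg (by simp [pvInBox])]
    simp

-- B's per-entry test agrees with pvInBox when both bound lists have ≥ 4 entries
theorem pv_ind_eq (mn mx : List Int) (h4n : 4 ≤ mn.length) (h4x : 4 ≤ mx.length)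
    (kv : List Int × String) :
    pvInd mn mx kv = if pvInBox mn mx kv.1 then (if kv.2 = "#" then 1 else 0) else 0 := by
  obtain ⟨m0, m1, m2, m3, mt, rfl⟩ := pv_len4 h4n
  obtain ⟨x0, x1, x2, x3, xt, rfl⟩ := pv_len4 h4x
  obtain ⟨k, v⟩ := kv
  match k with
  | [k0, k1, k2, k3] =>
    simp only [pvInd, pvInBox, Bool.and_eq_true, decide_eq_true_eq]
    rw [show PySem.List.pyGetD ([k0, k1, k2, k3] : List Int) 0 0 = k0 from rfl,
        show PySem.List.pyGetD ([k0, k1, k2, k3] : List Int) 1 0 = k1 from rfl,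
        show PySem.List.pyGetD ([k0, k1, k2, k3] : List Int) 2 0 = k2 from rfl,
        show PySem.List.pyGetD ([k0, k1, k2, k3] : List Int) 3 0 = k3 from rfl,
        show PySem.List.pyGetD (m0 :: m1 :: m2 :: m3 :: mt) 0 0 = m0 by rw [PySem.List.pyGetD_ofNat']; rfl,
        show PySem.List.pyGetD (m0 :: m1 :: m2 :: m3 :: mt) 1 0 = m1 by rw [PySem.List.pyGetD_ofNat']; rfl,
        show PySem.List.pyGetD (m0 :: m1 :: m2 :: m3 :: mt) 2 0 = m2 by rw [PySem.List.pyGetD_ofNat']; rfl,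
        show PySem.List.pyGetD (m0 :: m1 :: m2 :: m3 :: mt) 3 0 = m3 by rw [PySem.List.pyGetD_ofNat']; rfl,
        show PySem.List.pyGetD (x0 :: x1 :: x2 :: x3 :: xt) 0 0 = x0 by rw [PySem.List.pyGetD_ofNat']; rfl,
        show PySem.List.pyGetD (x0 :: x1 :: x2 :: x3 :: xt) 1 0 = x1 by rw [PySem.List.pyGetD_ofNat']; rfl,
        show PySem.List.pyGetD (x0 :: x1 :: x2 :: x3 :: xt) 2 0 = x2 by rw [PySem.List.pyGetD_ofNat']; rfl,
        show PySem.List.pyGetD (x0 :: x1 :: x2 :: x3 :: xt) 3 0 = x3 by rw [PySem.List.pyGetD_ofNat']; rfl]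
    simp only [List.zip_cons_cons, List.zip_nil_left, List.all_cons, List.all_nil,
      Bool.and_eq_true, decide_eq_true_eq, and_true, List.length_cons, List.length_nil]
    split_ifs <;> first | rfl | tauto
  | [] => simp [pvInd, pvInBox]
  | [k0] => simp [pvInd, pvInBox]
  | [k0, k1] => simp [pvInd, pvInBox]
  | [k0, k1, k2] => simp [pvInd, pvInBox]
  | k0 :: k1 :: k2 :: k3 :: k4 :: kt =>
    rw [pvInd, if_neg (by simp), if_neg (by simp [pvInBox])]

theorem pv_main (min_grid max_grid : List Int) (grid : List (List Int × String))
    (h4n : 4 ≤ min_grid.length) (h4x : 4 ≤ max_grid.length)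
    (hnd : (grid.map Prod.fst).Nodup) :
    pvBoxSum min_grid max_grid (pvG grid) = (grid.map (pvInd min_grid max_grid)).sum := by
  induction grid with
  | nil =>
    have h0 : pvG ([] : List (List Int × String)) = fun _ => 0 := by
      funext p
      rw [pvG, pv_get?_mk_eq_none (by simp)]
      simp
    rw [h0]
    simp [pvBoxSum]
  | cons kv rest ih =>
    simp only [List.map_cons, List.nodup_cons] at hnd
    have hsplit : pvG (kv :: rest) = fun p =>
        pvG rest p + (if p = kv.1 then (if kv.2 = "#" then 1 else 0) else 0) := by
      funext p
      unfold pvG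
      rw [show (PySem.Dict.mk (kv :: rest) : PySem.Dict (List Int) String) =
            PySem.Dict.mk ((kv.1, kv.2) :: rest) from rfl]
      rw [PySem.Dict.get?_mk_cons]
      by_cases hp : p = kv.1
      · subst hp
        rw [pv_get?_mk_eq_none hnd.1]
        simp
      · simp only [beq_iff_eq]
        rw [if_neg (show ¬(kv.1 = p) from fun h => hp h.symm)]
        simp [hp]
    rw [hsplit, pv_boxSum_add, ih hnd.2, pv_boxSum_single]
    simp only [List.map_cons, List.sum_cons, pv_ind_eq min_grid max_grid h4n h4x kv]
    ring

-- an empty coordinate range makes the whole box sum vanish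
theorem pv_boxSum_zero (mn mx : List Int) (G : List Int → Int) (j : Nat) (hj : j < 4)
    (h : pvR mn mx (j : Int) = []) : pvBoxSum mn mx G = 0 := by
  interval_cases j <;>
    simp only [Nat.cast_ofNat, Nat.cast_zero, Nat.cast_one] at h <;>
    simp [pvBoxSum, h]

-- with an empty reachable coordinate range, no entry passes B's bounds test
theorem pv_B_zero (mn mx : List Int) (grid : List (List Int × String)) (j : Nat)
    (hj : j < 4) (hjn : j < mn.length) (hjx : j < mx.length)
    (hle : mx.getD j 0 ≤ mn.getD j 0) :
    (grid.map (pvInd mn mx)).sum = 0 := by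
  apply List.sum_eq_zero
  intro x hx
  rcases List.mem_map.1 hx with ⟨kv, -, rfl⟩
  unfold pvInd
  rw [if_neg]
  rintro ⟨-, hlen, hall⟩
  have hjk : j < kv.1.length := by omega
  have hjz : j < (kv.1.zip (mn.zip mx)).length := by
    simp only [List.length_zip]
    omega
  have hmem : (kv.1.zip (mn.zip mx))[j] ∈ kv.1.zip (mn.zip mx) := List.getElem_mem hjz
  have hel : (kv.1.zip (mn.zip mx))[j] = (kv.1[j], (mn[j], mx[j])) := by
    simp [List.getElem_zip]
  rw [hel] at hmem
  have := List.all_eq_true.mp hall _ hmem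
  simp only [decide_eq_true_eq] at this
  rw [List.getD_eq_getElem mn 0 hjn, List.getD_eq_getElem mx 0 hjx] at hle
  omega

-- ===== VERDICT (by name: the statement is the Claim_ definition above) =====
theorem count_active_spec : Claim_equal_count_active := by
  intro min_grid max_grid grid _ hpre
  obtain ⟨hnd, hcase⟩ := hpre
  unfold Spec_count_active
  rw [pv_A_eq_boxSum, pv_B_eq_sum]
  rcases hcase with ⟨h4n, h4x⟩ | ⟨j, hj, hjn, hjx, hle⟩
  · exact pv_main min_grid max_grid grid h4n h4x hnd
  · rw [pv_B_zero min_grid max_grid grid j hj hjn hjx hle]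
    apply pv_boxSum_zero min_grid max_grid _ j hj
    apply PySem.List.pyRange_one_eq_nil
    rw [PySem.List.pyGetD_natCast, PySem.List.pyGetD_natCast]
    exact hle
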